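-- pv_equiv track=rewrite | github.com/minu2001/AlphaZero_Gomoku_Pygame | pygame_env.py | _find_five_in_a_row
-- ===== SOURCE A (Python) =====
-- from typing import Optional, Tuple, List
--
-- def _find_five_in_a_row(seq: List[Tuple[int, int]]):
--     if not seq: return []
--     for i in range(len(seq) - 4):
--         is_continuous = all(
--             (seq[i + j + 1][0] - seq[i + j][0]) ** 2 + (seq[i + j + 1][1] - seq[i + j][1]) ** 2 <= 2
--             for j in range(4)
--         )
--         if is_continuous: return seq[i:i + 5]
--     return seq[:5]
-- ===== SOURCE B (Python) =====
-- def _find_five_in_a_row(seq):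
--     if not seq:
--         return []
--     run = 0
--     for k in range(len(seq) - 1):
--         dx = seq[k + 1][0] - seq[k][0]
--         dy = seq[k + 1][1] - seq[k][1]
--         if dx * dx + dy * dy <= 2:
--             run += 1
--             if run == 4:
--                 return seq[k - 3:k + 2]
--         else:
--             run = 0
--     return seq[:5]
-- ===== Notes on version B (the rewrite author's own statement) =====
-- stated objective: faster
-- what changed: Replaced the per-window all()-recheck of 4 links with a single pass that maintains a running streak of good links and returns the window as soon as the streak reaches 4.
import Mathlib
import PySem

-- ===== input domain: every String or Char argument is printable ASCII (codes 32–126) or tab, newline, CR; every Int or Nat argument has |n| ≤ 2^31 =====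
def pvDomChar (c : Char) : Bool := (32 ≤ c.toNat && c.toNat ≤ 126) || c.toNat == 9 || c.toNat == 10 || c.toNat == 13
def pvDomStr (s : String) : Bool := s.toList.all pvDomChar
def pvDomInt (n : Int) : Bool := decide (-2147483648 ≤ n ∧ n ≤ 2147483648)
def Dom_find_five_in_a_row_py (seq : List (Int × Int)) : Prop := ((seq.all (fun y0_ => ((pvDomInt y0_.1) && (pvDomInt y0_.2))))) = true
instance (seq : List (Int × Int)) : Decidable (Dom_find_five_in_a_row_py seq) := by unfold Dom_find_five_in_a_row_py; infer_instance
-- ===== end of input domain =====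

-- B replaces A's per-window all()-recheck of 4 links by a single-pass running-streak scan (each link checked once).

-- ===== PORT A =====
-- the 'all(... for j in range(4))' window check of A; seq[i+j] indices are always in range
-- at the call sites, so pyGet? never yields none and .getD (0,0) is exact
def pvAWin (seq : List (Int × Int)) (i : Nat) : Bool :=
  (List.range 4).all (fun j =>
    let p := (PySem.List.pyGet? seq ((i + j + 1 : Nat) : Int)).getD (0, 0)
    let q := (PySem.List.pyGet? seq ((i + j : Nat) : Int)).getD (0, 0)
    decide ((p.1 - q.1) ^ 2 + (p.2 - q.2) ^ 2 ≤ 2))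

-- the 'for i in range(len(seq) - 4)' loop with early return; m = remaining iterations
def pvALoop (seq : List (Int × Int)) : Nat → Nat → List (Int × Int)
  | _, 0 => PySem.List.slice seq none (some 5)
  | i, m + 1 =>
    if pvAWin seq i then PySem.List.slice seq (some (i : Int)) (some ((i : Int) + 5))
    else pvALoop seq (i + 1) m

def find_five_in_a_row_py (seq : List (Int × Int)) : List (Int × Int) :=
  if seq = [] then [] else pvALoop seq 0 (seq.length - 4)

-- ===== PORT B =====
-- the 'for k in range(len(seq) - 1)' loop of B with state run; n = remaining iterations;
-- seq[k] / seq[k+1] are always in range inside the loop, so .getD (0,0) is exact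
def pvBLoop (seq : List (Int × Int)) : Nat → Nat → Nat → List (Int × Int)
  | _, _, 0 => PySem.List.slice seq none (some 5)
  | run, k, n + 1 =>
    let p := (PySem.List.pyGet? seq ((k + 1 : Nat) : Int)).getD (0, 0)
    let q := (PySem.List.pyGet? seq ((k : Nat) : Int)).getD (0, 0)
    let dx := p.1 - q.1
    let dy := p.2 - q.2
    if dx * dx + dy * dy ≤ 2 then
      if run + 1 = 4 then PySem.List.slice seq (some ((k : Int) - 3)) (some ((k : Int) + 2))
      else pvBLoop seq (run + 1) (k + 1) n
    else pvBLoop seq 0 (k + 1) n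

def find_five_in_a_row_py_alt (seq : List (Int × Int)) : List (Int × Int) :=
  if seq = [] then [] else pvBLoop seq 0 0 (seq.length - 1)

-- ===== PRECONDITION & SPEC =====
def Spec_find_five_in_a_row_py (seq : List (Int × Int)) (out : List (Int × Int)) : Prop := out = find_five_in_a_row_py_alt seq
instance (seq : List (Int × Int)) (out : List (Int × Int)) : Decidable (Spec_find_five_in_a_row_py seq out) := by unfold Spec_find_five_in_a_row_py; infer_instance

-- ===== CLAIM (what is proved, stated in full; the proofs are below) =====
def Claim_equal_find_five_in_a_row_py : Prop := ∀ (seq : List (Int × Int)), Dom_find_five_in_a_row_py seq → Spec_find_five_in_a_row_py seq (find_five_in_a_row_py seq)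

-- ===== LEMMAS AND PROOFS =====

-- whether the link between points k and k+1 is 'good' (distance² ≤ 2)
def pvG (seq : List (Int × Int)) (k : Nat) : Bool :=
  let p := seq.getD (k + 1) (0, 0)
  let q := seq.getD k (0, 0)
  decide ((p.1 - q.1) ^ 2 + (p.2 - q.2) ^ 2 ≤ 2)

lemma pvAWin_eq (seq : List (Int × Int)) (i : Nat) :
    pvAWin seq i = (pvG seq i && pvG seq (i + 1) && pvG seq (i + 2) && pvG seq (i + 3)) := by
  show (List.range 4).all _ = _
  have h4 : List.range 4 = [0, 1, 2, 3] := rfl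
  simp only [h4, List.all_cons, List.all_nil, Bool.and_true, pvG,
    PySem.List.pyGet?_natCast]
  simp only [List.getD_eq_getElem?_getD]
  norm_num [Bool.and_assoc]

lemma pvAWin_false (seq : List (Int × Int)) (i j : Nat) (hj : j < 4)
    (h : pvG seq (i + j) = false) : pvAWin seq i = false := by
  rw [pvAWin_eq]
  interval_cases j <;> simp_all

lemma pvALoop_skip (seq : List (Int × Int)) (i : Nat) (h : pvAWin seq i = false) :
    pvALoop seq i (seq.length - 4 - i) = pvALoop seq (i + 1) (seq.length - 4 - (i + 1)) := by
  rcases hm : seq.length - 4 - i with _ | m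
  · have : seq.length - 4 - (i + 1) = 0 := by omega
    rw [this]; rfl
  · have : seq.length - 4 - (i + 1) = m := by omega
    rw [this, pvALoop, h]
    simp

lemma pvALoop_skip_many (seq : List (Int × Int)) (d : Nat) :
    ∀ i, (∀ t, t < d → pvAWin seq (i + t) = false) →
    pvALoop seq i (seq.length - 4 - i) = pvALoop seq (i + d) (seq.length - 4 - (i + d)) := by
  induction d with
  | zero => intro i _; rfl
  | succ d ih =>
    intro i h
    rw [pvALoop_skip seq i (by simpa using h 0 (by omega))]
    rw [ih (i + 1) (fun t ht => by
      have := h (t + 1) (by omega); simpa [Nat.add_assoc, Nat.add_comm 1 t] using this)]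
    congr 1 <;> omega

-- the main coupling invariant: B's streak state (run good links ending just before k = i+run)
-- matches A's scan still standing at window i
lemma pvCouple (seq : List (Int × Int)) :
    ∀ n i run, run ≤ 3 → (∀ j, j < run → pvG seq (i + j) = true) →
    i + run + n + 1 = seq.length →
    pvBLoop seq run (i + run) n = pvALoop seq i (seq.length - 4 - i) := by
  intro n
  induction n with
  | zero =>
    intro i run h3 _ hlen
    have h0 : seq.length - 4 - i = 0 := by omega
    rw [h0]
    rfl
  | succ n ih =>
    intro i run h3 hinv hlen
    set k := i + run with hk
    have hk1 : k + 1 < seq.length := by omega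
    have hkl : k < seq.length := by omega
    -- B's loop condition equals pvG seq k
    have hcond : ((((PySem.List.pyGet? seq ((k + 1 : Nat) : Int)).getD (0, 0)).1 -
          ((PySem.List.pyGet? seq ((k : Nat) : Int)).getD (0, 0)).1) *
        (((PySem.List.pyGet? seq ((k + 1 : Nat) : Int)).getD (0, 0)).1 -
          ((PySem.List.pyGet? seq ((k : Nat) : Int)).getD (0, 0)).1) +
        (((PySem.List.pyGet? seq ((k + 1 : Nat) : Int)).getD (0, 0)).2 -
          ((PySem.List.pyGet? seq ((k : Nat) : Int)).getD (0, 0)).2) *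
        (((PySem.List.pyGet? seq ((k + 1 : Nat) : Int)).getD (0, 0)).2 -
          ((PySem.List.pyGet? seq ((k : Nat) : Int)).getD (0, 0)).2) ≤ 2) ↔ pvG seq k = true := by
      simp only [pvG, PySem.List.pyGet?_natCast, List.getD_eq_getElem?_getD,
        decide_eq_true_eq, pow_two]
    simp only [pvBLoop]
    by_cases hg : pvG seq k = true
    · rw [if_pos (hcond.mpr hg)]
      by_cases hrun : run = 3
      · subst hrun
        rw [if_pos rfl]
        -- window at i is good: links i, i+1, i+2 from the invariant, i+3 = k from hg
        have hwin : pvAWin seq i = true := by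
          rw [pvAWin_eq]
          have g0 := hinv 0 (by omega)
          have g1 := hinv 1 (by omega)
          have g2 := hinv 2 (by omega)
          simp at g0
          rw [g0, g1, g2, show i + 3 = k from rfl, hg]
          rfl
        rcases hm : seq.length - 4 - i with _ | m
        · omega
        · have e1 : (k : Int) - 3 = (i : Int) := by push_cast [hk]; ring
          have e2 : (k : Int) + 2 = (i : Int) + 5 := by push_cast [hk]; ring
          rw [pvALoop, hwin, e1, e2]
          simp
      · rw [if_neg (by omega)]
        have := ih i (run + 1) (by omega)
          (fun j hj => by
            rcases Nat.lt_succ_iff_lt_or_eq.mp hj with h | h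
            · exact hinv j h
            · subst h; exact hg)
          (by omega)
        rw [show k + 1 = i + (run + 1) from by omega]
        exact this
    · rw [if_neg (fun hc => hg (hcond.mp hc))]
      have hB := ih (k + 1) 0 (by omega) (by omega) (by omega)
      simp only [Nat.add_zero] at hB
      rw [hB]
      -- A skips windows i .. i+run: each contains the bad link k = i+run
      rw [pvALoop_skip_many seq (run + 1) i (fun t ht =>
        pvAWin_false seq (i + t) (run - t) (by omega)
          (by rw [show i + t + (run - t) = k from by omega]
              simpa using hg))]
      congr 1

-- ===== VERDICT (by name: the statement is the Claim_ definition above) =====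
theorem find_five_in_a_row_py_spec : Claim_equal_find_five_in_a_row_py := by
  intro seq _
  unfold Spec_find_five_in_a_row_py find_five_in_a_row_py find_five_in_a_row_py_alt
  by_cases h : seq = []
  · simp [h]
  · rw [if_neg h, if_neg h]
    have hlen : 1 ≤ seq.length := by
      cases seq with
      | nil => simp at h
      | cons a l => simp
    have := pvCouple seq (seq.length - 1) 0 0 (by omega) (by omega) (by omega)
    simp only [Nat.add_zero, Nat.sub_zero] at this
    exact this.symm
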